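-- pv_equiv track=rewrite | github.com/tk032/python-CodingTest | 프로그래머스/0/181874. A 강조하기/A 강조하기.py | solution
-- ===== SOURCE A (Python) =====
-- def solution(myString):
--     answer = ''
--     for index, i in enumerate(myString):
--         if i == 'a' or i == "A":
--             i = i.upper()
--         else:
--             i = i.lower()
--         answer += i
--
--     return answer
-- ===== SOURCE B (Python) =====
-- def solution(myString):
--     return myString.lower().replace('a', 'A')
-- ===== Notes on version B (the rewrite author's own statement) =====
-- stated objective: faster
-- what changed: Replaces the per-character enumerate loop with branching and repeated string concatenation by two whole-string library passes: lower() the string, then replace the lowered letter with its uppercase form.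
import Mathlib
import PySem

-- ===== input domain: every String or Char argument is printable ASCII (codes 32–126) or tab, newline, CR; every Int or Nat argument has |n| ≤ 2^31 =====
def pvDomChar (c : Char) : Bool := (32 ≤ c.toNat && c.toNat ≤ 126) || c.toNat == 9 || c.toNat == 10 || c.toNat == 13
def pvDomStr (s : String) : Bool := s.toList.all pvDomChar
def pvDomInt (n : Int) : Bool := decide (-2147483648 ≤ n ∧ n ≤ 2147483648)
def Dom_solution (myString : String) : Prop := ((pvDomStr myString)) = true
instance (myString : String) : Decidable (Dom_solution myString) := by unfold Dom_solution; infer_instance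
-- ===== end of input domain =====

-- B replaces A's per-character loop (branch + string concatenation) by two whole-string passes: lower() then replace('a','A').

-- ===== PORT A =====
-- answer = ''; for index, i in enumerate(myString): i = i.upper() if i in ('a','A') else i.lower(); answer += i
def solution (myString : String) : String :=
  (PySem.List.enumerate myString.toList).foldl
    (fun answer p =>
      let i := p.2
      let i' := if i == 'a' || i == 'A' then PySem.Chars.upperChar i else PySem.Chars.lowerChar i
      answer.push i')
    ""

-- ===== PORT B =====
def solution_alt (myString : String) : String :=
  PySem.Str.replace (PySem.Str.lower myString) "a" "A"

-- ===== PRECONDITION & SPEC =====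
def Spec_solution (myString : String) (out : String) : Prop := out = solution_alt myString
instance (myString : String) (out : String) : Decidable (Spec_solution myString out) := by unfold Spec_solution; infer_instance

-- ===== CLAIM (what is proved, stated in full; the proofs are below) =====
def Claim_equal_solution : Prop := ∀ (myString : String), Dom_solution myString → Spec_solution myString (solution myString)

-- ===== LEMMAS AND PROOFS =====

theorem char_toNat_eq (c d : Char) (h : c.toNat = d.toNat) : c = d :=
  Char.ext (UInt32.toNat_inj.mp h)

theorem lowerChar_eq_a_iff (c : Char) : PySem.Chars.lowerChar c = 'a' ↔ c = 'a' ∨ c = 'A' := by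
  unfold PySem.Chars.lowerChar PySem.Chars.isupper
  constructor
  · intro h
    split_ifs at h with hu
    · right
      simp only [decide_eq_true_eq, Bool.and_eq_true] at hu
      obtain ⟨h1, h2⟩ := hu
      rw [Char.le_def, UInt32.le_iff_toNat_le] at h1 h2
      have e0 : c.toNat = c.val.toNat := rfl
      have e1 : ('A' : Char).val.toNat = 65 := rfl
      have e2 : ('Z' : Char).val.toNat = 90 := rfl
      have hv : (c.toNat + 32) < 0xD800 := by omega
      have ht : (Char.ofNat (c.toNat + 32)).toNat = c.toNat + 32 := by
        simp [Char.toNat_ofNat, Nat.isValidChar, hv]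
      have h97 : c.toNat + 32 = 97 := by
        have := congrArg Char.toNat h
        rw [ht] at this
        simpa using this
      have e3 : ('A' : Char).toNat = 65 := rfl
      exact char_toNat_eq c 'A' (by omega)
    · left; exact h
  · rintro (rfl | rfl) <;> decide

-- replace.go with one-char pattern ['a'] is a pointwise substitution
theorem replace_go_single (new : List Char) :
    ∀ (l : List Char) (fuel : Nat) (acc : List Char), l.length ≤ fuel →
      PySem.Chars.replace.go ['a'] new fuel l acc
        = acc.reverse ++ l.flatMap (fun c => if c = 'a' then new else [c]) := by
  intro l
  induction l with
  | nil =>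
      intro fuel acc _
      cases fuel <;> simp [PySem.Chars.replace.go]
  | cons c t ih =>
      intro fuel acc hle
      cases fuel with
      | zero => simp at hle
      | succ n =>
        by_cases hc : c = 'a'
        · subst hc
          have hpre : (['a'] : List Char).isPrefixOf ('a' :: t) = true := by
            simp [List.isPrefixOf]
          rw [PySem.Chars.replace.go]
          simp only [hpre, if_pos]
          rw [show List.drop (['a'] : List Char).length ('a' :: t) = t from rfl]
          rw [ih n (new.reverse ++ acc) (Nat.le_of_succ_le_succ hle)]
          simp
        · have hpre : (['a'] : List Char).isPrefixOf (c :: t) = false := by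
            simp [List.isPrefixOf]
            exact fun h => absurd h.symm hc
          rw [PySem.Chars.replace.go]
          simp only [hpre, Bool.false_eq_true, if_false]
          rw [ih n (c :: acc) (Nat.le_of_succ_le_succ hle)]
          simp [hc]

theorem replace_lower_single (l : List Char) :
    PySem.Chars.replace (PySem.Chars.lower l) ['a'] ['A']
      = l.map (fun c => if c = 'a' ∨ c = 'A' then 'A' else PySem.Chars.lowerChar c) := by
  unfold PySem.Chars.replace
  simp only [List.isEmpty_iff, reduceCtorEq, if_false]
  rw [replace_go_single ['A'] _ _ [] (le_refl _)]
  simp only [List.reverse_nil, List.nil_append, PySem.Chars.lower, List.flatMap_map]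
  induction l with
  | nil => simp
  | cons c t ih =>
      simp only [List.flatMap_cons, List.map_cons, ih]
      by_cases h : c = 'a' ∨ c = 'A'
      · rw [if_pos ((lowerChar_eq_a_iff c).mpr h), if_pos h]; simp
      · rw [if_neg (fun hh => h ((lowerChar_eq_a_iff c).mp hh)), if_neg h]; simp

theorem foldl_push (f : Char → Char) :
    ∀ (l : List Char) (a : String),
      (l.foldl (fun answer c => answer.push (f c)) a).toList = a.toList ++ l.map f := by
  intro l
  induction l with
  | nil => intro a; simp
  | cons c t ih => intro a; simp [ih, String.toList_push]

theorem foldl_enumerate_push (step : String → Char → String) :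
    ∀ (l : List Char) (k : Int) (a : String),
      (PySem.List.enumerate l k).foldl (fun answer p => step answer p.2) a
        = l.foldl step a := by
  intro l
  induction l with
  | nil => intro k a; simp [PySem.List.enumerate]
  | cons c t ih => intro k a; simp [PySem.List.enumerate, ih]

theorem upper_lower_pointwise (c : Char) :
    (if c == 'a' || c == 'A' then PySem.Chars.upperChar c else PySem.Chars.lowerChar c)
      = (if c = 'a' ∨ c = 'A' then 'A' else PySem.Chars.lowerChar c) := by
  by_cases h : c = 'a' ∨ c = 'A'
  · rcases h with rfl | rfl <;> decide
  · push Not at h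
    rw [if_neg (by simpa using h), if_neg (by simp [h.1, h.2])]

-- ===== VERDICT (by name: the statement is the Claim_ definition above) =====
theorem solution_spec : Claim_equal_solution := by
  intro s _
  unfold Spec_solution solution solution_alt
  apply String.toList_inj.mp
  rw [foldl_enumerate_push
        (fun answer c => answer.push
          (if c == 'a' || c == 'A' then PySem.Chars.upperChar c else PySem.Chars.lowerChar c)),
      foldl_push
        (fun c => if c == 'a' || c == 'A' then PySem.Chars.upperChar c else PySem.Chars.lowerChar c)]
  simp only [PySem.Str.toList_replace, PySem.Str.toList_lower, String.toList_empty, List.nil_append]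
  rw [show ("a" : String).toList = ['a'] from rfl, show ("A" : String).toList = ['A'] from rfl,
      replace_lower_single]
  exact List.map_congr_left (fun c _ => upper_lower_pointwise c)
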